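-- pv_equiv track=rewrite | github.com/Saifullahshaikh/-IPU-Intensive-Programming-Unit-01 | 3 Python Programming Examples on Lists/18 Remove ith Occurrence of given word.py | ithOccurrence
-- ===== SOURCE A (Python) =====
-- def ithOccurrence(i, word,lst):
--     count=0
--     for x in range(len(lst)):
--         if lst[x]==word:
--             count+=1
--             if count==i:
--                 lst[x] =''
--     return lst
-- ===== SOURCE B (Python) =====
-- def ithOccurrence(i, word, lst):
--     positions = [idx for idx, x in enumerate(lst) if x == word]
--     if 1 <= i <= len(positions):
--         lst[positions[i - 1]] = ''
--     return lst
-- ===== Notes on version B (the rewrite author's own statement) =====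
-- stated objective: simpler
-- what changed: Replaces the counter-threaded scan that rewrites during traversal with a build-index-list-then-single-targeted-assignment decomposition (collect all occurrence positions, then blank positions[i-1] under a bounds guard).
import Mathlib
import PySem

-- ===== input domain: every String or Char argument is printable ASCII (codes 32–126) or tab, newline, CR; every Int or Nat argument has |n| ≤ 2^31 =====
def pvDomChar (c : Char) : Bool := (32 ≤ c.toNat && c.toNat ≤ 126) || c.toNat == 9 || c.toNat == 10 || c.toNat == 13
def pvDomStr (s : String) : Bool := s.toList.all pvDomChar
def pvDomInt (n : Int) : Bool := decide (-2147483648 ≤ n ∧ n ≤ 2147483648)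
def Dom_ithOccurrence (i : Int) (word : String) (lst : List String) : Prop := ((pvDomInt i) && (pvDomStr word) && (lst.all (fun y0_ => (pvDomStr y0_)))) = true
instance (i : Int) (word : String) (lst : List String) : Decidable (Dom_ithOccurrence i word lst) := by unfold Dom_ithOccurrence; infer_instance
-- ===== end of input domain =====

-- B replaces A's counter-threaded in-place scan with collect-occurrence-positions then one
-- targeted assignment (simpler decomposition, same cost); both Pythons mutate lst in place,
-- the equivalence proved is about the returned value.


-- ===== PORT A =====
-- A's loop over range(len(lst)) reads/writes only the current index, so it is the
-- structural recursion over the list carrying the running count.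
def ithOccurrenceGo (i : Int) (word : String) (count : Int) : List String → List String
  | [] => []
  | a :: rest =>
    if a == word then
      (if count + 1 == i then "" else a) :: ithOccurrenceGo i word (count + 1) rest
    else
      a :: ithOccurrenceGo i word count rest

def ithOccurrence (i : Int) (word : String) (lst : List String) : List String :=
  ithOccurrenceGo i word 0 lst

-- ===== PORT B =====
-- port of: positions = [idx for idx, x in enumerate(lst) if x == word]
def positionsOf (word : String) : List String → Nat → List Nat
  | [], _ => []
  | a :: rest, k =>
    if a == word then k :: positionsOf word rest (k + 1) else positionsOf word rest (k + 1)

def ithOccurrence_alt (i : Int) (word : String) (lst : List String) : List String :=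
  let positions := positionsOf word lst 0
  if 1 ≤ i ∧ i ≤ (positions.length : Int) then
    lst.set (positions.getD (i - 1).toNat 0) ""
  else
    lst

-- ===== PRECONDITION & SPEC =====
def Spec_ithOccurrence (i : Int) (word : String) (lst : List String) (out : List String) : Prop := out = ithOccurrence_alt i word lst
instance (i : Int) (word : String) (lst : List String) (out : List String) : Decidable (Spec_ithOccurrence i word lst out) := by unfold Spec_ithOccurrence; infer_instance

-- ===== CLAIM (what is proved, stated in full; the proofs are below) =====
def Claim_equal_ithOccurrence : Prop := ∀ (i : Int) (word : String) (lst : List String), Dom_ithOccurrence i word lst → Spec_ithOccurrence i word lst (ithOccurrence i word lst)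

-- ===== LEMMAS AND PROOFS =====

-- reference function: blank the i-th occurrence, decrementing i past each occurrence
def blankIth (i : Int) (word : String) : List String → List String
  | [] => []
  | a :: rest =>
    if a == word then (if i == 1 then "" else a) :: blankIth (i - 1) word rest
    else a :: blankIth i word rest

theorem go_eq_blank (word : String) (lst : List String) :
    ∀ (i c : Int), ithOccurrenceGo i word c lst = blankIth (i - c) word lst := by
  induction lst with
  | nil => intro i c; rfl
  | cons a rest ih =>
    intro i c
    simp only [ithOccurrenceGo, blankIth]
    by_cases h : a == word
    · simp only [h, ih]
      have h1 : (c + 1 == i) = (i - c == 1) := by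
        by_cases hc : c + 1 = i
        · have hc2 : i - c = 1 := by omega
          simp [hc, hc2]
        · have : ¬ (i - c = 1) := by omega
          simp [hc, this]
      have h2 : i - (c + 1) = i - c - 1 := by ring
      rw [h1, h2]
    · simp [h, ih]

theorem positionsOf_shift (word : String) (lst : List String) :
    ∀ k, positionsOf word lst k = (positionsOf word lst 0).map (· + k) := by
  induction lst with
  | nil => intro k; rfl
  | cons a rest ih =>
    intro k
    simp only [positionsOf]
    by_cases h : a == word
    · rw [if_pos h, if_pos h, ih (k + 1), ih 1, List.map_cons, List.map_map]
      simp
      intro x _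
      omega
    · rw [if_neg h, if_neg h, ih (k + 1), ih 1, List.map_map]
      apply List.map_congr_left; intro x _; simp; omega

theorem blank_eq_alt (word : String) (lst : List String) :
    ∀ (i : Int),
      blankIth i word lst =
        (if 1 ≤ i ∧ i ≤ ((positionsOf word lst 0).length : Int) then
          lst.set ((positionsOf word lst 0).getD (i - 1).toNat 0) ""
        else lst) := by
  induction lst with
  | nil =>
    intro i
    simp only [blankIth, positionsOf, List.length_nil]
    split
    · rename_i h; simp at h; omega
    · rfl
  | cons a rest ih =>
    intro i
    simp only [blankIth, positionsOf]
    by_cases h : a == word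
    · rw [if_pos h, if_pos h]
      by_cases h1 : i = 1
      · subst h1
        have : blankIth 0 word rest = rest := by
          rw [ih 0]; split
          · rename_i hg; omega
          · rfl
        simp [this, positionsOf_shift word rest 1]
      · rw [ih (i - 1), positionsOf_shift word rest 1]
        by_cases hg : 1 ≤ i - 1 ∧ i - 1 ≤ ((positionsOf word rest 0).length : Int)
        · rw [if_pos hg]
          have hg' : 1 ≤ i ∧ i ≤ (((0 : Nat) :: (positionsOf word rest 0).map (· + 1)).length : Int) := by
            simp; omega
          rw [if_pos hg']
          have hi : (i - 1).toNat = (i - 2).toNat + 1 := by omega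
          rw [hi]
          simp only [List.getD, List.getElem?_cons_succ]
          have hlt : (i - 2).toNat < (positionsOf word rest 0).length := by
            have := hg.2; omega
          have : ((positionsOf word rest 0).map (· + 1))[(i - 2).toNat]?
              = some ((positionsOf word rest 0)[(i - 2).toNat] + 1) := by
            simp [List.getElem?_eq_getElem hlt]
          rw [this]
          have h2 : (i - 1 - 1).toNat = (i - 2).toNat := by omega
          rw [h2]
          simp [List.getElem?_eq_getElem hlt]
          exact fun hc => absurd hc h1
        · rw [if_neg hg]
          have hg' : ¬ (1 ≤ i ∧ i ≤ (((0 : Nat) :: (positionsOf word rest 0).map (· + 1)).length : Int)) := by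
            simp; intro hle; simp at hg; omega
          rw [if_neg hg']
          simp [h1]
    · rw [if_neg h, if_neg h, ih i, positionsOf_shift word rest 1]
      by_cases hg : 1 ≤ i ∧ i ≤ ((positionsOf word rest 0).length : Int)
      · rw [if_pos hg]
        have hg' : 1 ≤ i ∧ i ≤ (((positionsOf word rest 0).map (· + 1)).length : Int) := by
          simpa using hg
        rw [if_pos hg']
        have hlt : i.toNat - 1 < (positionsOf word rest 0).length := by
          have := hg.2; have := hg.1; omega
        have e1 : (i - 1).toNat = i.toNat - 1 := by have := hg.1; omega
        have : ((positionsOf word rest 0).map (· + 1)).getD (i - 1).toNat 0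
            = (positionsOf word rest 0)[i.toNat - 1] + 1 := by
          rw [e1]; simp [List.getD, List.getElem?_eq_getElem hlt]
        rw [this, e1]
        simp [List.getD, List.getElem?_eq_getElem hlt]
      · rw [if_neg hg]
        have hg' : ¬ (1 ≤ i ∧ i ≤ (((positionsOf word rest 0).map (· + 1)).length : Int)) := by
          simpa using hg
        rw [if_neg hg']

-- ===== VERDICT (by name: the statement is the Claim_ definition above) =====
theorem ithOccurrence_spec : Claim_equal_ithOccurrence := by
  intro i word lst _
  unfold Spec_ithOccurrence ithOccurrence ithOccurrence_alt
  rw [go_eq_blank word lst i 0]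
  have := blank_eq_alt word lst (i - 0)
  simpa using this
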